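-- pv_equiv track=rewrite | github.com/xuan1250/Transfer2Read | backend/app/services/conversion/heuristic_structure.py | _detect_title
-- ===== SOURCE A (Python) =====
-- from typing import List, Dict, Any, Optional, Tuple
--
-- def _detect_title(lines: List[str]) -> Optional[str]:
--     """
--     Attempt to detect document title from first few lines.
--
--     Strategy:
--         - Look for all-caps lines in first 50 lines
--         - Look for short prominent lines
--         - Return first match or None
--     """
--     for line in lines[:50]:
--         line_stripped = line.strip()
--
--         # All-caps line that looks like a title
--         if (
--             line_stripped.isupper() and
--             10 < len(line_stripped) < 100 and
--             not line_stripped.startswith(("PAGE", "CHAPTER", "SECTION"))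
--         ):
--             return line_stripped
--
--     # If no all-caps found, look for first prominent line
--     for line in lines[:20]:
--         line_stripped = line.strip()
--         if 10 < len(line_stripped) < 100 and line_stripped[0].isupper():
--             return line_stripped
--
--     return None
-- ===== SOURCE B (Python) =====
-- from typing import List, Optional
--
-- def _detect_title(lines: List[str]) -> Optional[str]:
--     """Single pass over lines[:50]: return the first all-caps title immediately,
--     while remembering the first prominent line from the first 20 as a fallback."""
--     fallback = None
--     for i, line in enumerate(lines[:50]):
--         s = line.strip()
--         n = len(s)
--         if 10 < n < 100:
--             if s.isupper() and not s.startswith(("PAGE", "CHAPTER", "SECTION")):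
--                 return s
--             if fallback is None and i < 20 and s[0].isupper():
--                 fallback = s
--     return fallback
-- ===== Notes on version B (the rewrite author's own statement) =====
-- stated objective: simpler
-- what changed: Replaces A's two sequential scans (all-caps over lines[:50], then prominent over lines[:20]) by one enumerate pass over lines[:50] that returns an all-caps title immediately and holds the first prominent line with index < 20 as a fallback, so each line is stripped at most once.
import Mathlib
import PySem

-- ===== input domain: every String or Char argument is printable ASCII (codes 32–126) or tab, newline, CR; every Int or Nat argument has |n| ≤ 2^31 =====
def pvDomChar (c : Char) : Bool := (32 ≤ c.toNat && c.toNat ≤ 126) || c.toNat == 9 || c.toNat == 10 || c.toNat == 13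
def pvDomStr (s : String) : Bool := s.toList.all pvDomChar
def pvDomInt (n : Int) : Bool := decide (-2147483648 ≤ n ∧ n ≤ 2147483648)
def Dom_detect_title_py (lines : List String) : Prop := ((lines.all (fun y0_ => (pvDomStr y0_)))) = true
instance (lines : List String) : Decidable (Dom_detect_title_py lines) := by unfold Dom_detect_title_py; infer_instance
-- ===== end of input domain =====

-- B collapses A's two sequential scans into one pass with a held fallback; return value is unchanged.

-- ===== PORT A =====
-- str.isupper(): hand-ported — exact on printable ASCII (cased = letters there):
-- at least one uppercase letter and no lowercase letter.
def pyStrIsupper (s : String) : Bool :=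
  s.toList.any PySem.Chars.isupper && s.toList.all (fun c => !PySem.Chars.islower c)

-- line_stripped.startswith(("PAGE", "CHAPTER", "SECTION")): tuple = any-of
def startsTitleWord (s : String) : Bool :=
  PySem.Str.startswith s "PAGE" || PySem.Str.startswith s "CHAPTER" || PySem.Str.startswith s "SECTION"

-- line_stripped[0].isupper(); only evaluated under the 10 < len guard, so the [] case is unreachable
def firstUpper (s : String) : Bool :=
  match s.toList with
  | [] => false
  | c :: _ => PySem.Chars.isupper c

-- first loop of A: for line in lines[:50]
def detectTitleCaps : List String → Option String
  | [] => none
  | line :: rest =>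
    let ls := PySem.Str.strip line
    if pyStrIsupper ls && decide (10 < PySem.Str.len ls) && decide (PySem.Str.len ls < 100)
        && !startsTitleWord ls then
      some ls
    else detectTitleCaps rest

-- second loop of A: for line in lines[:20]
def detectTitleProm : List String → Option String
  | [] => none
  | line :: rest =>
    let ls := PySem.Str.strip line
    if decide (10 < PySem.Str.len ls) && decide (PySem.Str.len ls < 100) && firstUpper ls then
      some ls
    else detectTitleProm rest

def detect_title_py (lines : List String) : Option String :=
  match detectTitleCaps (PySem.List.slice lines none (some 50)) with
  | some t => some t
  | none => detectTitleProm (PySem.List.slice lines none (some 20))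

-- ===== PORT B =====
-- single loop: for i, line in enumerate(lines[:50]) with a held fallback
def detectTitleLoop : List String → Nat → Option String → Option String
  | [], _, fb => fb
  | line :: rest, i, fb =>
    let s := PySem.Str.strip line
    let n := PySem.Str.len s
    if 10 < n ∧ n < 100 then
      if pyStrIsupper s && !startsTitleWord s then some s
      else if fb.isNone && decide (i < 20) && firstUpper s then
        detectTitleLoop rest (i + 1) (some s)
      else detectTitleLoop rest (i + 1) fb
    else detectTitleLoop rest (i + 1) fb

def detect_title_py_alt (lines : List String) : Option String :=
  detectTitleLoop (PySem.List.slice lines none (some 50)) 0 none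

-- ===== PRECONDITION & SPEC =====
def Spec_detect_title_py (lines : List String) (out : Option String) : Prop := out = detect_title_py_alt lines
instance (lines : List String) (out : Option String) : Decidable (Spec_detect_title_py lines out) := by unfold Spec_detect_title_py; infer_instance

-- ===== CLAIM (what is proved, stated in full; the proofs are below) =====
def Claim_equal_detect_title_py : Prop := ∀ (lines : List String), Dom_detect_title_py lines → Spec_detect_title_py lines (detect_title_py lines)

-- ===== LEMMAS AND PROOFS =====

-- B's loop = A's caps scan, falling back to fb, then to A's prominent scan on the remaining window
theorem detectTitleLoop_eq (xs : List String) : ∀ (i : Nat) (fb : Option String),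
    detectTitleLoop xs i fb =
      match detectTitleCaps xs with
      | some t => some t
      | none =>
        match fb with
        | some v => some v
        | none => detectTitleProm (xs.take (20 - i)) := by
  induction xs with
  | nil => intro i fb; cases fb <;> simp [detectTitleLoop, detectTitleCaps, detectTitleProm]
  | cons line rest ih =>
    intro i fb
    simp only [detectTitleLoop, detectTitleCaps]
    by_cases hR : 10 < PySem.Str.len (PySem.Str.strip line) ∧ PySem.Str.len (PySem.Str.strip line) < 100
    · rw [if_pos hR]
      by_cases hU : (pyStrIsupper (PySem.Str.strip line) && !startsTitleWord (PySem.Str.strip line)) = true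
      · have hA : (pyStrIsupper (PySem.Str.strip line) && decide (10 < PySem.Str.len (PySem.Str.strip line))
            && decide (PySem.Str.len (PySem.Str.strip line) < 100)
            && !startsTitleWord (PySem.Str.strip line)) = true := by
          simp only [Bool.and_eq_true, decide_eq_true_eq] at hU ⊢
          exact ⟨⟨⟨hU.1, hR.1⟩, hR.2⟩, hU.2⟩
        rw [if_pos hU, if_pos hA]
      · have hA : ¬ (pyStrIsupper (PySem.Str.strip line) && decide (10 < PySem.Str.len (PySem.Str.strip line))
            && decide (PySem.Str.len (PySem.Str.strip line) < 100)
            && !startsTitleWord (PySem.Str.strip line)) = true := by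
          intro h
          simp only [Bool.and_eq_true] at h
          exact hU (by simp [h.1.1.1, h.2])
        rw [if_neg hU, if_neg hA]
        by_cases hF : (fb.isNone && decide (i < 20) && firstUpper (PySem.Str.strip line)) = true
        · rw [if_pos hF, ih]
          simp only [Bool.and_eq_true, Option.isNone_iff_eq_none, decide_eq_true_eq] at hF
          obtain ⟨⟨hfbn, hi⟩, hfu⟩ := hF
          cases hcr : detectTitleCaps rest
          · have h20 : 20 - i = (20 - (i + 1)) + 1 := by omega
            have hRn : 10 < (PySem.Chars.strip line.toList).length ∧ (PySem.Chars.strip line.toList).length < 100 := by simpa using hR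
            simp [hfbn, h20, detectTitleProm, hRn.1, hRn.2, hfu]
          · rfl
        · rw [if_neg hF, ih]
          cases hcr : detectTitleCaps rest
          · cases fb with
            | some v => rfl
            | none =>
              by_cases hi : i < 20
              · have hfu : firstUpper (PySem.Str.strip line) = false := by
                  cases h : firstUpper (PySem.Str.strip line)
                  · rfl
                  · exact absurd (by simp [h, hi]) hF
                have h20 : 20 - i = (20 - (i + 1)) + 1 := by omega
                simp [h20, detectTitleProm, hfu]
              · have h20a : 20 - i = 0 := by omega
                have h20b : 20 - (i + 1) = 0 := by omega
                simp [h20a, h20b]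
          · rfl
    · rw [if_neg hR]
      have hA : ¬ (pyStrIsupper (PySem.Str.strip line) && decide (10 < PySem.Str.len (PySem.Str.strip line))
          && decide (PySem.Str.len (PySem.Str.strip line) < 100)
          && !startsTitleWord (PySem.Str.strip line)) = true := by
        intro h
        simp only [Bool.and_eq_true, decide_eq_true_eq] at h
        exact hR ⟨h.1.1.2, h.1.2⟩
      rw [if_neg hA, ih]
      cases hcr : detectTitleCaps rest
      · cases fb with
        | some v => rfl
        | none =>
          by_cases hi : i < 20
          · have hRn : ¬(10 < (PySem.Chars.strip line.toList).length ∧ (PySem.Chars.strip line.toList).length < 100) := by simpa using hR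
            have h20 : 20 - i = (20 - (i + 1)) + 1 := by omega
            simp [h20, detectTitleProm]
            intro h1 h2
            exact absurd ⟨h1, h2⟩ hRn
          · have h20a : 20 - i = 0 := by omega
            have h20b : 20 - (i + 1) = 0 := by omega
            simp [h20a, h20b]
      · rfl

theorem slice50_eq (lines : List String) :
    PySem.List.slice lines none (some 50) = lines.take 50 := by
  simpa using PySem.List.slice_to lines (b := 50) (by norm_num)

theorem slice20_eq (lines : List String) :
    PySem.List.slice lines none (some 20) = lines.take 20 := by
  simpa using PySem.List.slice_to lines (b := 20) (by norm_num)

-- ===== VERDICT (by name: the statement is the Claim_ definition above) =====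
theorem detect_title_py_spec : Claim_equal_detect_title_py := by
  intro lines _
  unfold Spec_detect_title_py detect_title_py detect_title_py_alt
  rw [detectTitleLoop_eq, slice50_eq, slice20_eq]
  cases h : detectTitleCaps (lines.take 50)
  · simp [List.take_take]
  · simp
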